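-- pv_equiv track=rewrite | github.com/bitrodevo-dot/- | bot.py | _ext_from
-- ===== SOURCE A (Python) =====
-- def _ext_from(url: str, fname: str = "") -> str:
--     for src in (fname, url):
--         if not src:
--             continue
--         clean = src.split("?")[0].split("#")[0]
--         for ext in (".mp4", ".mov", ".jpg", ".jpeg", ".png", ".webp", ".mp3", ".m4a"):
--             if clean.lower().endswith(ext):
--                 return ext
--     return ".mp4"
-- ===== SOURCE B (Python) =====
-- _EXTS = frozenset((".mp4", ".mov", ".jpg", ".jpeg", ".png", ".webp", ".mp3", ".m4a"))
--
--
-- def _ext_from(url: str, fname: str = "") -> str: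
--     for src in (fname, url):
--         if not src:
--             continue
--         clean = src.split("?")[0].split("#")[0]
--         if "." not in clean:
--             continue
--         ext = "." + clean.rsplit(".", 1)[1].lower()
--         if ext in _EXTS:
--             return ext
--     return ".mp4"
-- ===== Notes on version B (the rewrite author's own statement) =====
-- stated objective: idiomatic
-- what changed: Replaces the inner 8-iteration endswith scan by computing the candidate extension once via rsplit('.',1) on the cleaned source and testing membership in a frozenset of extensions.
import Mathlib
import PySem

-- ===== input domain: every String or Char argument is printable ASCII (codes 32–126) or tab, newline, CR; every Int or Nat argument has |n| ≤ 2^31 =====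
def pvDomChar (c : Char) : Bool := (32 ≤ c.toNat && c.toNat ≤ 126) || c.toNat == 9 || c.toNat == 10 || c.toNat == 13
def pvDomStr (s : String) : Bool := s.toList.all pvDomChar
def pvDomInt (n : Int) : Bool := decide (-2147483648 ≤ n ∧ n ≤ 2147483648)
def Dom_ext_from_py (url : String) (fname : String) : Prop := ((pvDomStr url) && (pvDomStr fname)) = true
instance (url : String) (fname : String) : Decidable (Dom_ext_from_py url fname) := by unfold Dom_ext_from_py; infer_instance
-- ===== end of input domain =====

-- B replaces A's 8-way endswith scan by one rsplit('.',1)-derived key and a set membership test (idiomatic; same cost class).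

-- ===== PORT A =====
-- clean = src.split("?")[0].split("#")[0] — identical expression in both Pythons, so shared by both ports.
-- split(sep)[0] is exact via PySem.Chars.splitOn (sep nonempty, result list never empty).
def pvClean (src : List Char) : List Char :=
  (PySem.Chars.splitOn ((PySem.Chars.splitOn src ['?']).headD []) ['#']).headD []

-- the tuple of extensions A scans (B's frozenset holds the same eight strings)
def pvExts : List (List Char) :=
  [".mp4".toList, ".mov".toList, ".jpg".toList, ".jpeg".toList,
   ".png".toList, ".webp".toList, ".mp3".toList, ".m4a".toList]

-- A's inner loop 'for ext in (…): if clean.lower().endswith(ext): return ext'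
def pvAFind (clean : List Char) : Option (List Char) :=
  pvExts.find? (fun e => PySem.Chars.endswith (PySem.Chars.lower clean) e)

def pvALoop : List (List Char) → String
  | [] => ".mp4"
  | src :: rest =>
    if src = [] then pvALoop rest
    else
      match pvAFind (pvClean src) with
      | some e => String.mk e
      | none => pvALoop rest

def ext_from_py (url : String) (fname : String) : String :=
  pvALoop [fname.toList, url.toList]

-- ===== PORT B =====
-- exact port of clean.rsplit(".", 1)[1] under B's guard '"." in clean': the segment after the LAST '.'
def pvRsplitTail (clean : List Char) : List Char :=
  (clean.reverse.takeWhile (· != '.')).reverse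

-- B's body per source: if "." in clean: ext = "." + tail.lower(); if ext in _EXTS: return ext
def pvBFind (clean : List Char) : Option (List Char) :=
  if PySem.Chars.isIn ['.'] clean then
    let ext := '.' :: PySem.Chars.lower (pvRsplitTail clean)
    if ext ∈ pvExts then some ext else none
  else none

def pvBLoop : List (List Char) → String
  | [] => ".mp4"
  | src :: rest =>
    if src = [] then pvBLoop rest
    else
      match pvBFind (pvClean src) with
      | some e => String.mk e
      | none => pvBLoop rest

def ext_from_py_alt (url : String) (fname : String) : String :=
  pvBLoop [fname.toList, url.toList]

-- ===== PRECONDITION & SPEC =====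
def Spec_ext_from_py (url : String) (fname : String) (out : String) : Prop := out = ext_from_py_alt url fname
instance (url : String) (fname : String) (out : String) : Decidable (Spec_ext_from_py url fname out) := by unfold Spec_ext_from_py; infer_instance

-- ===== CLAIM (what is proved, stated in full; the proofs are below) =====
def Claim_equal_ext_from_py : Prop := ∀ (url : String) (fname : String), Dom_ext_from_py url fname → Spec_ext_from_py url fname (ext_from_py url fname)

-- ===== LEMMAS AND PROOFS =====

lemma pv_char_le_toNat (a c : Char) (h : a ≤ c) : a.toNat ≤ c.toNat :=
  UInt32.le_iff_toNat_le.mp (Char.le_def.mp h)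

-- str.lower() maps a character to '.' exactly when it is '.'
lemma pv_lowerChar_dot_iff (c : Char) : PySem.Chars.lowerChar c = '.' ↔ c = '.' := by
  unfold PySem.Chars.lowerChar PySem.Chars.isupper
  split_ifs with h
  · simp only [Bool.and_eq_true, decide_eq_true_eq] at h
    have h1 := pv_char_le_toNat _ _ h.1
    have h2 := pv_char_le_toNat _ _ h.2
    have eA : ('A':Char).toNat = 65 := by decide
    have eZ : ('Z':Char).toNat = 90 := by decide
    constructor
    · intro he
      exfalso
      have hv : (c.toNat + 32).isValidChar := by left; omega
      have ht : (Char.ofNat (c.toNat + 32)).toNat = c.toNat + 32 := by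
        rw [Char.toNat_ofNat, if_pos hv]
      rw [he] at ht
      have hdot : ('.':Char).toNat = 46 := by decide
      omega
    · intro he
      exfalso
      rw [he] at h1
      have hdot : ('.':Char).toNat = 46 := by decide
      omega
  · simp

lemma pv_mem_dot_lower (l : List Char) : '.' ∈ PySem.Chars.lower l ↔ '.' ∈ l := by
  unfold PySem.Chars.lower
  simp only [List.mem_map]
  constructor
  · rintro ⟨a, ha, he⟩
    rwa [(pv_lowerChar_dot_iff a).mp he] at ha
  · intro h
    exact ⟨'.', h, (pv_lowerChar_dot_iff '.').mpr rfl⟩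

lemma pv_pred_lower (c : Char) : (PySem.Chars.lowerChar c != '.') = (c != '.') := by
  simp [bne, pv_lowerChar_dot_iff]

-- lowercasing commutes with taking the segment after the last '.'
lemma pv_rsplitTail_lower (l : List Char) :
    pvRsplitTail (PySem.Chars.lower l) = PySem.Chars.lower (pvRsplitTail l) := by
  unfold pvRsplitTail PySem.Chars.lower
  have hf : ((fun x => x != '.') ∘ PySem.Chars.lowerChar) = (fun x : Char => (x != '.')) := by
    funext c; exact pv_pred_lower c
  rw [← List.map_reverse, List.takeWhile_map, hf, ← List.map_reverse]

lemma pv_takeWhile_append_ne (p : Char → Bool) (xs ys : List Char) (y : Char)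
    (hxs : ∀ x ∈ xs, p x = true) (hy : p y = false) :
    (xs ++ y :: ys).takeWhile p = xs := by
  induction xs with
  | nil => simp [hy]
  | cons a as ih =>
    have ha : p a = true := hxs a (by simp)
    simp only [List.cons_append, List.takeWhile_cons, ha, if_pos]
    rw [ih (fun x hx => hxs x (by simp [hx]))]

-- last-dot decomposition of a list containing '.'
lemma pv_last_dot_decomp (L : List Char) (h : '.' ∈ L) :
    ∃ pre, L = pre ++ '.' :: pvRsplitTail L ∧ '.' ∉ pvRsplitTail L := by
  have hr : '.' ∈ L.reverse := by simpa using h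
  set p : Char → Bool := (· != '.') with hp
  have hne : L.reverse.dropWhile p ≠ [] := by
    intro hnil
    have : L.reverse.takeWhile p = L.reverse := by
      have := List.takeWhile_append_dropWhile (p := p) (l := L.reverse)
      rw [hnil, List.append_nil] at this; exact this
    have := List.mem_takeWhile_imp (this ▸ hr)
    simp [hp] at this
  obtain ⟨y, ys, hdw⟩ : ∃ y ys, L.reverse.dropWhile p = y :: ys := by
    cases hcase : L.reverse.dropWhile p with
    | nil => exact absurd hcase hne
    | cons a as => exact ⟨a, as, rfl⟩
  have hy : p y = false := by
    have h3 := List.head_dropWhile_not p hne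
    have h4 : (L.reverse.dropWhile p).head? = some y := by rw [hdw]; rfl
    rw [List.head?_eq_some_head hne] at h4
    rwa [Option.some_inj.mp h4] at h3
  have hy' : y = '.' := by simpa [hp] using hy
  have hsplit : L.reverse.takeWhile p ++ '.' :: ys = L.reverse := by
    rw [← hy', ← hdw]; exact List.takeWhile_append_dropWhile
  refine ⟨ys.reverse, ?_, ?_⟩
  · have := congrArg List.reverse hsplit
    simpa [pvRsplitTail] using this.symm
  · intro hmem
    have : '.' ∈ L.reverse.takeWhile p := by simpa [pvRsplitTail] using hmem
    have := List.mem_takeWhile_imp this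
    simp [hp] at this

-- '.'++d is a suffix of L (d dot-free) exactly when d is L's after-last-dot segment
lemma pv_suffix_iff (L d : List Char) (hL : '.' ∈ L) (hd : '.' ∉ d) :
    ('.' :: d <:+ L) ↔ d = pvRsplitTail L := by
  obtain ⟨pre, hdec, hnd⟩ := pv_last_dot_decomp L hL
  constructor
  · rintro ⟨p, hpL⟩
    have h1 : L.reverse.takeWhile (· != '.') = d.reverse := by
      rw [← hpL]
      have : (p ++ '.' :: d).reverse = d.reverse ++ '.' :: p.reverse := by simp
      rw [this]
      apply pv_takeWhile_append_ne
      · intro x hx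
        simp only [List.mem_reverse] at hx
        simp [bne]
        intro hxe; exact hd (hxe ▸ hx)
      · simp
    have : pvRsplitTail L = d := by
      unfold pvRsplitTail; rw [h1]; simp
    exact this.symm
  · intro hde
    rw [hde]
    exact ⟨pre, hdec.symm⟩

lemma pv_find?_congr {α : Type} (l : List α) (p q : α → Bool)
    (h : ∀ a ∈ l, p a = q a) : l.find? p = l.find? q := by
  induction l with
  | nil => rfl
  | cons a as ih =>
    have ha := h a (by simp)
    simp only [List.find?_cons, ha]
    cases q a with
    | true => rfl
    | false => exact ih (fun x hx => h x (by simp [hx]))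

lemma pv_find?_beq {α : Type} [DecidableEq α] [BEq α] [LawfulBEq α] (l : List α) (a : α) :
    l.find? (fun e => e == a) = if a ∈ l then some a else none := by
  induction l with
  | nil => simp
  | cons b bs ih =>
    by_cases hba : b = a
    · subst hba; simp
    · have hb : (b == a) = false := beq_false_of_ne hba
      simp only [List.find?_cons, hb, ih, List.mem_cons]
      simp [Ne.symm hba]

-- '"." in clean' is membership of the character '.'
lemma pv_isIn_dot (clean : List Char) :
    PySem.Chars.isIn ['.'] clean = true ↔ '.' ∈ clean := by
  rw [PySem.Chars.isIn_iff_infix]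
  constructor
  · intro h
    exact List.singleton_sublist.mp h.sublist
  · intro h
    obtain ⟨s, t, hst⟩ := List.append_of_mem h
    exact ⟨s, t, by simp [hst]⟩

-- per-source equivalence: the endswith scan finds exactly the rsplit-derived key when it is in the set
lemma pv_find_eq (clean : List Char) : pvAFind clean = pvBFind clean := by
  unfold pvAFind pvBFind
  by_cases hdot : '.' ∈ clean
  · have hdL : '.' ∈ PySem.Chars.lower clean := (pv_mem_dot_lower clean).mpr hdot
    rw [if_pos ((pv_isIn_dot clean).mpr hdot)]
    have hext : '.' :: PySem.Chars.lower (pvRsplitTail clean)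
        = '.' :: pvRsplitTail (PySem.Chars.lower clean) := by
      rw [pv_rsplitTail_lower]
    have hpred : ∀ e ∈ pvExts,
        (PySem.Chars.endswith (PySem.Chars.lower clean) e)
          = (e == '.' :: pvRsplitTail (PySem.Chars.lower clean)) := by
      intro e he
      obtain ⟨d, rfl, hd⟩ : ∃ d, e = '.' :: d ∧ '.' ∉ d := by
        fin_cases he <;> exact ⟨_, rfl, by decide⟩
      rw [Bool.eq_iff_iff]
      simp only [PySem.Chars.endswith, List.isSuffixOf_iff_suffix, beq_iff_eq, List.cons.injEq,
        true_and]
      exact pv_suffix_iff _ d hdL hd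
    rw [pv_find?_congr _ _ _ hpred, pv_find?_beq, ← hext]
  · have hnL : '.' ∉ PySem.Chars.lower clean := fun h => hdot ((pv_mem_dot_lower clean).mp h)
    rw [if_neg (by simp [pv_isIn_dot, hdot])]
    rw [List.find?_eq_none]
    have hall : ∀ e ∈ pvExts, '.' ∈ e := by decide
    intro e he hsw
    rw [PySem.Chars.endswith, List.isSuffixOf_iff_suffix] at hsw
    have := hsw.sublist.subset (hall e he)
    exact hnL this

lemma pv_loop_eq (srcs : List (List Char)) : pvALoop srcs = pvBLoop srcs := by
  induction srcs with
  | nil => rfl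
  | cons src rest ih =>
    simp only [pvALoop, pvBLoop, pv_find_eq, ih]

-- ===== VERDICT (by name: the statement is the Claim_ definition above) =====
theorem ext_from_py_spec : Claim_equal_ext_from_py := by
  intro url fname _
  show ext_from_py url fname = ext_from_py_alt url fname
  simp [ext_from_py, ext_from_py_alt, pv_loop_eq]
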